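-- pv_equiv track=rewrite | github.com/arisafaribinridwan/tool-fcost | app/ui/main_window.py | _parse_dropped_files
-- ===== SOURCE A (Python) =====
-- def _parse_dropped_files(raw_drop_data: str) -> tuple[str, ...]:
--     value = raw_drop_data.strip()
--     if not value:
--         return ()
--
--     paths: list[str] = []
--     current: list[str] = []
--     in_braces = False
--     for char in value:
--         if char == "{":
--             if current:
--                 token = "".join(current).strip()
--                 if token:
--                     paths.append(token)
--                 current = []
--             in_braces = True
--             continue
--         if char == "}" and in_braces:
--             token = "".join(current).strip()
--             if token:
--                 paths.append(token)
--             current = []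
--             in_braces = False
--             continue
--         if char.isspace() and not in_braces:
--             token = "".join(current).strip()
--             if token:
--                 paths.append(token)
--             current = []
--             continue
--         current.append(char)
--
--     token = "".join(current).strip()
--     if token:
--         paths.append(token)
--     return tuple(paths)
-- ===== SOURCE B (Python) =====
-- def _parse_dropped_files(raw_drop_data: str) -> tuple[str, ...]:
--     value = raw_drop_data.strip()
--     segments = value.split("{")
--     paths = list(segments[0].split())
--     for segment in segments[1:]:
--         idx = segment.find("}")
--         if idx == -1:
--             # unterminated brace group: the whole segment is one (stripped) token
--             token = segment.strip()
--             if token: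
--                 paths.append(token)
--         else:
--             token = segment[:idx].strip()
--             if token:
--                 paths.append(token)
--             paths.extend(segment[idx + 1:].split())
--     return tuple(paths)
-- ===== Notes on version B (the rewrite author's own statement) =====
-- stated objective: simpler
-- what changed: A's character-by-character state machine (paths/current/in_braces flags) is replaced by splitting the stripped input at opening braces and handling each segment whole: the head segment via str.split(), each later segment by locating its first closing brace and appending the stripped brace token plus the whitespace-split remainder.
import Mathlib
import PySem

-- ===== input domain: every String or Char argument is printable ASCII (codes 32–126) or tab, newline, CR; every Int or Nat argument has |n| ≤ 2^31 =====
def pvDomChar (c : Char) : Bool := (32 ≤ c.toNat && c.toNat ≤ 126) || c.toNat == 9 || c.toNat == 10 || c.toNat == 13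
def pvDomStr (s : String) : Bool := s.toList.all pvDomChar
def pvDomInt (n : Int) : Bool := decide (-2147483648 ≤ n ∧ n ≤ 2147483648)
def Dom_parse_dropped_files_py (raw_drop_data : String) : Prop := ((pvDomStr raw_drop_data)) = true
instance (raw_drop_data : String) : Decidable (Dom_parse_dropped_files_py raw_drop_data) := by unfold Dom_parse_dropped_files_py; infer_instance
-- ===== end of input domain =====

-- B replaces A's char-by-char brace/whitespace state machine by a split-at-opening-braces segment
-- decomposition (simpler, and measured faster by a constant factor: segment work happens in
-- str-level primitives instead of a per-character Python loop); return values proved equal on every string.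

-- ===== PORT A =====
-- one loop iteration of A: state = (paths, current, in_braces)
def pvAStep (st : List String × List Char × Bool) (c : Char) : List String × List Char × Bool :=
  match st with
  | (paths, current, in_braces) =>
    if c = '{' then
      let paths :=
        if current ≠ [] then
          let token := PySem.Chars.strip current
          if token ≠ [] then paths ++ [String.ofList token] else paths
        else paths
      (paths, [], true)
    else if c = '}' ∧ in_braces = true then
      let token := PySem.Chars.strip current
      ((if token ≠ [] then paths ++ [String.ofList token] else paths), [], false)
    else if PySem.Chars.isspace c = true ∧ in_braces = false then
      let token := PySem.Chars.strip current
      ((if token ≠ [] then paths ++ [String.ofList token] else paths), [], in_braces)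
    else (paths, current ++ [c], in_braces)

def parse_dropped_files_py (raw_drop_data : String) : List String :=
  let value := PySem.Chars.strip raw_drop_data.toList
  if value = [] then []
  else
    match value.foldl pvAStep ([], [], false) with
    | (paths, current, _) =>
      let token := PySem.Chars.strip current
      if token ≠ [] then paths ++ [String.ofList token] else paths

-- ===== PORT B =====
-- B's loop body: one '{'-segment; idx = segment.find('}'), slices segment[:idx] / segment[idx+1:]
def pvBSeg (paths : List String) (segment : List Char) : List String :=
  let idx := PySem.Chars.find segment ['}']
  if idx = -1 then
    let token := PySem.Chars.strip segment
    if token ≠ [] then paths ++ [String.ofList token] else paths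
  else
    let token := PySem.Chars.strip (PySem.Chars.slice segment none (some idx))
    (if token ≠ [] then paths ++ [String.ofList token] else paths) ++
      (PySem.Chars.split₀ (PySem.Chars.slice segment (some (idx + 1)) none)).map String.ofList

def parse_dropped_files_py_alt (raw_drop_data : String) : List String :=
  let value := PySem.Chars.strip raw_drop_data.toList
  match PySem.Chars.splitOn value ['{'] with
  | [] => []  -- unreachable: str.split never returns an empty list
  | seg0 :: rest => rest.foldl pvBSeg ((PySem.Chars.split₀ seg0).map String.ofList)

-- ===== PRECONDITION & SPEC =====
def Spec_parse_dropped_files_py (raw_drop_data : String) (out : List String) : Prop := out = parse_dropped_files_py_alt raw_drop_data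
instance (raw_drop_data : String) (out : List String) : Decidable (Spec_parse_dropped_files_py raw_drop_data out) := by unfold Spec_parse_dropped_files_py; infer_instance

-- ===== CLAIM (what is proved, stated in full; the proofs are below) =====
def Claim_equal_parse_dropped_files_py : Prop := ∀ (raw_drop_data : String), Dom_parse_dropped_files_py raw_drop_data → Spec_parse_dropped_files_py raw_drop_data (parse_dropped_files_py raw_drop_data)

-- ===== LEMMAS AND PROOFS =====

-- flush the pending token (strip, drop if empty) — the step A performs at '{', '}', whitespace and at the end
def pvFlush (paths : List String) (cur : List Char) : List String :=
  if PySem.Chars.strip cur ≠ [] then paths ++ [String.ofList (PySem.Chars.strip cur)] else paths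

def pvFinalize (st : List String × List Char × Bool) : List String := pvFlush st.1 st.2.1

-- recursive model of value.split('{') for a one-char separator
def pvSplitChar (c : Char) : List Char → List (List Char)
  | [] => [[]]
  | d :: rest =>
    if d = c then [] :: pvSplitChar c rest
    else
      match pvSplitChar c rest with
      | [] => [[d]]
      | t :: ts => (d :: t) :: ts

theorem pvSplitChar_ne_nil (c : Char) (s : List Char) : pvSplitChar c s ≠ [] := by
  cases s with
  | nil => simp [pvSplitChar]
  | cons d rest =>
    simp only [pvSplitChar]
    split
    · simp
    · split <;> simp

theorem pv_splitOn_go (c : Char) : ∀ (fuel : Nat) (l cur : List Char) (acc : List (List Char)),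
    l.length < fuel →
    PySem.Chars.splitOn.go [c] fuel l cur acc
      = acc.reverse ++ (match pvSplitChar c l with
          | [] => [cur.reverse]
          | t :: ts => (cur.reverse ++ t) :: ts) := by
  intro fuel
  induction fuel with
  | zero => intro l cur acc h; omega
  | succ f ih =>
    intro l cur acc h
    cases l with
    | nil => simp [PySem.Chars.splitOn.go, pvSplitChar]
    | cons d rest =>
      by_cases hd : c = d
      · subst hd
        have h1 : List.isPrefixOf [c] (c :: rest) = true := by simp [List.isPrefixOf]
        simp only [PySem.Chars.splitOn.go, h1, if_pos, List.length_cons, List.drop_succ_cons, List.drop_zero, List.length_nil]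
        rw [ih rest [] (cur.reverse :: acc) (by simpa using h)]
        obtain ⟨t, ts, hts⟩ : ∃ t ts, pvSplitChar c rest = t :: ts := by
          cases hx : pvSplitChar c rest with
          | nil => exact absurd hx (pvSplitChar_ne_nil c rest)
          | cons t ts => exact ⟨t, ts, rfl⟩
        simp [pvSplitChar, hts]
      · have h1 : List.isPrefixOf [c] (d :: rest) = false := by
          simpa [List.isPrefixOf] using hd
        simp only [PySem.Chars.splitOn.go, h1]
        rw [if_neg (by simp)]
        rw [ih rest (d :: cur) acc (by simpa using h)]
        obtain ⟨t, ts, hts⟩ : ∃ t ts, pvSplitChar c rest = t :: ts := by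
          cases hx : pvSplitChar c rest with
          | nil => exact absurd hx (pvSplitChar_ne_nil c rest)
          | cons t ts => exact ⟨t, ts, rfl⟩
        have hdc : ¬ (d = c) := fun h2 => hd h2.symm
        simp [pvSplitChar, hts, hdc]

theorem splitOn_eq_pvSplitChar (c : Char) (s : List Char) :
    PySem.Chars.splitOn s [c] = pvSplitChar c s := by
  unfold PySem.Chars.splitOn
  rw [pv_splitOn_go c (s.length + 1) s [] [] (by omega)]
  obtain ⟨t, ts, hts⟩ : ∃ t ts, pvSplitChar c s = t :: ts := by
    cases hx : pvSplitChar c s with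
    | nil => exact absurd hx (pvSplitChar_ne_nil c s)
    | cons t ts => exact ⟨t, ts, rfl⟩
  simp [hts]

theorem pvSplitChar_of_not_mem (c : Char) (s : List Char) (h : c ∉ s) :
    pvSplitChar c s = [s] := by
  induction s with
  | nil => rfl
  | cons d rest ih =>
    have hd : ¬ (d = c) := fun he => h (by simp [he])
    have hr := ih (fun hm => h (by simp [hm]))
    simp [pvSplitChar, hd, hr]

theorem pvSplitChar_append (c : Char) (s0 rest : List Char) (h : c ∉ s0) :
    pvSplitChar c (s0 ++ c :: rest) = s0 :: pvSplitChar c rest := by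
  induction s0 with
  | nil => simp [pvSplitChar]
  | cons d t ih =>
    have hd : ¬ (d = c) := fun he => h (by simp [he])
    have hr := ih (fun hm => h (by simp [hm]))
    simp [pvSplitChar, hd, hr]

theorem pv_first_split (c : Char) (s : List Char) (h : c ∈ s) :
    ∃ s0 rest, s = s0 ++ c :: rest ∧ c ∉ s0 := by
  induction s with
  | nil => simp at h
  | cons d t ih =>
    by_cases hd : d = c
    · exact ⟨[], t, by simp [hd], by simp⟩
    · have hm : c ∈ t := by
        rcases List.mem_cons.mp h with h1 | h1
        · exact absurd h1.symm hd
        · exact h1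
      obtain ⟨s0, rest, he, hn⟩ := ih hm
      exact ⟨d :: s0, rest, by simp [he], by
        intro hx
        rcases List.mem_cons.mp hx with h1 | h1
        · exact hd h1.symm
        · exact hn h1⟩

theorem pv_dropWhile_no (l : List Char) (h : ∀ c ∈ l, PySem.Chars.isspace c = false) :
    List.dropWhile PySem.Chars.isspace l = l := by
  cases l with
  | nil => rfl
  | cons d t => simp [h d (by simp)]

theorem pv_strip_no_space (cur : List Char) (h : ∀ c ∈ cur, PySem.Chars.isspace c = false) :
    PySem.Chars.strip cur = cur := by
  unfold PySem.Chars.strip PySem.Chars.lstrip PySem.Chars.rstrip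
  rw [pv_dropWhile_no cur h, pv_dropWhile_no cur.reverse (by simpa using h)]
  simp

theorem pv_go_acc (seg : List Char) : ∀ (cur : List Char) (acc : List (List Char)),
    PySem.Chars.split₀.go seg cur acc = acc.reverse ++ PySem.Chars.split₀.go seg cur [] := by
  induction seg with
  | nil => intro cur acc; simp only [PySem.Chars.split₀.go]; split <;> simp
  | cons c rest ih =>
    intro cur acc
    simp only [PySem.Chars.split₀.go]
    split
    · split
      · exact ih [] acc
      · rw [ih [] (cur.reverse :: acc), ih [] [cur.reverse]]; simp
    · exact ih (c :: cur) acc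

theorem pv_singleton_infix (a : Char) (l : List Char) : [a] <:+: l ↔ a ∈ l := by
  constructor
  · rintro ⟨s, t, rfl⟩; simp
  · intro h
    obtain ⟨s, t, rfl⟩ := List.append_of_mem h
    exact ⟨s, t, by simp⟩

theorem pv_find_decomp (s : List Char) (h : PySem.Chars.find s ['}'] ≠ -1) :
    ∃ k : Nat, PySem.Chars.find s ['}'] = (k : Int) ∧
      s = s.take k ++ '}' :: s.drop (k + 1) ∧ '}' ∉ s.take k := by
  have h0 : 0 ≤ PySem.Chars.find s ['}'] := by
    have := PySem.Chars.neg_one_le_find s ['}']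
    omega
  obtain ⟨hpre, hmin⟩ := PySem.Chars.find_spec h0
  refine ⟨(PySem.Chars.find s ['}']).toNat, (Int.toNat_of_nonneg h0).symm, ?_, ?_⟩
  · obtain ⟨t, ht⟩ := hpre
    have hlt : (PySem.Chars.find s ['}']).toNat < s.length := by
      by_contra hge
      rw [List.drop_eq_nil_of_le (by omega)] at ht
      simp at ht
    conv_lhs => rw [← List.take_append_drop (PySem.Chars.find s ['}']).toNat s]
    rw [List.drop_eq_getElem_cons hlt] at ht ⊢
    have h2 : s[(PySem.Chars.find s ['}']).toNat]? = some '}' := by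
      simpa using congrArg (List.head? ·) ht.symm
    rw [List.getElem?_eq_getElem hlt] at h2
    rw [Option.some_inj.mp h2]
  · intro hmem
    obtain ⟨i, hi, hgi⟩ := List.getElem_of_mem hmem
    have hi2 : i < min (PySem.Chars.find s ['}']).toNat s.length := by
      simpa [List.length_take] using hi
    have hlen : i < s.length := by omega
    have hi' : i < (PySem.Chars.find s ['}']).toNat := by omega
    apply hmin i hi'
    rw [List.drop_eq_getElem_cons hlen]
    refine ⟨List.drop (i+1) s, ?_⟩
    rw [List.getElem_take] at hgi
    simp [hgi]

-- how one A-step behaves in each mode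
theorem pvAStep_brace (paths : List String) (cur : List Char) (b : Bool) :
    pvAStep (paths, cur, b) '{' = (pvFlush paths cur, [], true) := by
  by_cases hc : cur = [] <;>
    simp [pvAStep, pvFlush, hc, PySem.Chars.strip, PySem.Chars.lstrip, PySem.Chars.rstrip]

theorem pvAStep_close (paths : List String) (cur : List Char) :
    pvAStep (paths, cur, true) '}' = (pvFlush paths cur, [], false) := by
  simp [pvAStep, pvFlush]

theorem pvAStep_space (paths : List String) (cur : List Char) (c : Char)
    (hsp : PySem.Chars.isspace c = true) :
    pvAStep (paths, cur, false) c = (pvFlush paths cur, [], false) := by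
  have hc : ¬ (c = '{') := by rintro rfl; simp [PySem.Chars.isspace] at hsp
  simp [pvAStep, pvFlush, hc, hsp]

theorem pvAStep_other (paths : List String) (cur : List Char) (c : Char)
    (hsp : PySem.Chars.isspace c = false) (hc : ¬ (c = '{')) :
    pvAStep (paths, cur, false) c = (paths, cur ++ [c], false) := by
  simp [pvAStep, hc, hsp]

theorem pvAStep_in (paths : List String) (cur : List Char) (c : Char)
    (hc : ¬ (c = '{')) (hc2 : ¬ (c = '}')) :
    pvAStep (paths, cur, true) c = (paths, cur ++ [c], true) := by
  simp [pvAStep, hc, hc2]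

-- outside-brace run, ended by the final flush: exactly str.split() of cur ++ seg
theorem pvK1a (seg : List Char) :
    ∀ (paths : List String) (cur : List Char), '{' ∉ seg →
    (∀ c ∈ cur, PySem.Chars.isspace c = false) →
    pvFinalize (List.foldl pvAStep (paths, cur, false) seg)
      = paths ++ (PySem.Chars.split₀.go seg cur.reverse []).map String.ofList := by
  induction seg with
  | nil =>
    intro paths cur _ hcur
    simp only [List.foldl_nil, pvFinalize, pvFlush, PySem.Chars.split₀.go]
    rw [pv_strip_no_space cur hcur]
    by_cases hc : cur = [] <;> simp [hc]
  | cons c rest ih =>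
    intro paths cur h hcur
    have hc : ¬ (c = '{') := fun he => h (by simp [he])
    have hrest : '{' ∉ rest := fun hm => h (by simp [hm])
    rw [List.foldl_cons]
    by_cases hsp : PySem.Chars.isspace c = true
    · rw [pvAStep_space _ _ _ hsp]
      rw [ih _ [] hrest (by simp)]
      simp only [PySem.Chars.split₀.go, hsp, if_pos]
      by_cases hcur0 : cur = []
      · simp [hcur0, pvFlush, PySem.Chars.strip, PySem.Chars.lstrip, PySem.Chars.rstrip]
      · rw [if_neg (by simp [hcur0])]
        rw [pv_go_acc rest []]
        simp [pvFlush, pv_strip_no_space cur hcur, hcur0]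
    · have hsp2 : PySem.Chars.isspace c = false := by simpa using hsp
      rw [pvAStep_other _ _ _ hsp2 hc]
      rw [ih _ (cur ++ [c]) hrest ?side]
      case side =>
        intro x hx
        rcases List.mem_append.mp hx with h1 | h1
        · exact hcur x h1
        · simp at h1; subst h1; exact hsp2
      simp only [PySem.Chars.split₀.go, hsp2]
      simp

-- outside-brace run, ended by a '{'
theorem pvK1b (seg : List Char) :
    ∀ (rest : List Char) (paths : List String) (cur : List Char), '{' ∉ seg →
    (∀ c ∈ cur, PySem.Chars.isspace c = false) →
    List.foldl pvAStep (paths, cur, false) (seg ++ '{' :: rest)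
      = List.foldl pvAStep (paths ++ (PySem.Chars.split₀.go seg cur.reverse []).map String.ofList, [], true) rest := by
  induction seg with
  | nil =>
    intro rest paths cur _ hcur
    simp only [List.nil_append, List.foldl_cons, pvAStep_brace, PySem.Chars.split₀.go]
    congr 1
    simp only [pvFlush, pv_strip_no_space cur hcur]
    by_cases hc : cur = [] <;> simp [hc]
  | cons c seg ih =>
    intro rest paths cur h hcur
    have hc : ¬ (c = '{') := fun he => h (by simp [he])
    have hseg : '{' ∉ seg := fun hm => h (by simp [hm])
    rw [List.cons_append, List.foldl_cons]
    by_cases hsp : PySem.Chars.isspace c = true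
    · rw [pvAStep_space _ _ _ hsp]
      rw [ih rest _ [] hseg (by simp)]
      simp only [PySem.Chars.split₀.go, hsp, if_pos]
      by_cases hcur0 : cur = []
      · simp [hcur0, pvFlush, PySem.Chars.strip, PySem.Chars.lstrip, PySem.Chars.rstrip]
      · rw [if_neg (by simp [hcur0])]
        rw [pv_go_acc seg []]
        simp [pvFlush, pv_strip_no_space cur hcur, hcur0]
    · have hsp2 : PySem.Chars.isspace c = false := by simpa using hsp
      rw [pvAStep_other _ _ _ hsp2 hc]
      rw [ih rest _ (cur ++ [c]) hseg ?side]
      case side =>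
        intro x hx
        rcases List.mem_append.mp hx with h1 | h1
        · exact hcur x h1
        · simp at h1; subst h1; exact hsp2
      simp only [PySem.Chars.split₀.go, hsp2]
      simp

-- inside braces every char except '{' and '}' is accumulated verbatim
theorem pvK2run (seg : List Char) :
    ∀ (paths : List String) (cur : List Char), '{' ∉ seg → '}' ∉ seg →
    List.foldl pvAStep (paths, cur, true) seg = (paths, cur ++ seg, true) := by
  induction seg with
  | nil => intro paths cur _ _; simp
  | cons c rest ih =>
    intro paths cur h1 h2
    have hc : ¬ (c = '{') := fun he => h1 (by simp [he])
    have hc2 : ¬ (c = '}') := fun he => h2 (by simp [he])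
    rw [List.foldl_cons, pvAStep_in _ _ _ hc hc2,
      ih _ _ (fun hm => h1 (by simp [hm])) (fun hm => h2 (by simp [hm]))]
    simp

-- B's one-segment step on a segment with no '}' is just the flush
theorem pvBSeg_no_close (paths : List String) (seg : List Char) (h : '}' ∉ seg) :
    pvBSeg paths seg = pvFlush paths seg := by
  have hf : PySem.Chars.find seg ['}'] = -1 := by
    rw [PySem.Chars.find_eq_neg_one_iff]
    exact fun hi => h ((pv_singleton_infix _ _).mp hi)
  simp [pvBSeg, hf, pvFlush]

-- B's one-segment step on a segment whose first '}' is at index k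
theorem pvBSeg_close (paths : List String) (seg : List Char) (k : Nat)
    (hk : PySem.Chars.find seg ['}'] = (k : Int)) :
    pvBSeg paths seg
      = pvFlush paths (seg.take k) ++ (PySem.Chars.split₀ (seg.drop (k + 1))).map String.ofList := by
  simp only [pvBSeg, hk]
  rw [if_neg (by omega)]
  have h1 : PySem.Chars.slice seg none (some (k : Int)) = seg.take k := by
    rw [PySem.Chars.slice_eq_listSlice, PySem.List.slice_to _ (by omega)]
    simp
  have h2 : PySem.Chars.slice seg (some ((k : Int) + 1)) none = seg.drop (k + 1) := by
    have : (k : Int) + 1 = ((k + 1 : Nat) : Int) := by push_cast; ring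
    rw [PySem.Chars.slice_eq_listSlice, this, PySem.List.slice_from _ (by omega)]
    simp
  rw [h1, h2]
  simp [pvFlush]

-- inside-mode run over one '{'-free segment, ended by the final flush
theorem pvM2no (cs : List Char) (h : '{' ∉ cs) (paths : List String) :
    pvFinalize (List.foldl pvAStep (paths, [], true) cs) = pvBSeg paths cs := by
  by_cases hf : PySem.Chars.find cs ['}'] = -1
  · have hcl : '}' ∉ cs := by
      rw [PySem.Chars.find_eq_neg_one_iff] at hf
      exact fun hm => hf ((pv_singleton_infix _ _).mpr hm)
    rw [pvK2run cs _ _ h hcl, pvBSeg_no_close _ _ hcl]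
    simp [pvFinalize]
  · obtain ⟨k, hk, hdec, hpre⟩ := pv_find_decomp cs hf
    have hpre1 : '{' ∉ cs.take k := fun hm => h (List.mem_of_mem_take hm)
    have hsuf1 : '{' ∉ cs.drop (k + 1) := fun hm => h (List.mem_of_mem_drop hm)
    conv_lhs => rw [hdec]
    rw [List.foldl_append, pvK2run _ _ _ hpre1 hpre, List.foldl_cons, List.nil_append,
      pvAStep_close, pvK1a _ _ _ hsuf1 (by simp)]
    rw [pvBSeg_close _ _ k hk]
    rfl

-- inside-mode main lemma: A from state (paths, [], true) = B's fold over the '{'-segments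
theorem pvM2 (n : Nat) : ∀ cs : List Char, cs.length ≤ n → ∀ paths,
    pvFinalize (List.foldl pvAStep (paths, [], true) cs)
      = List.foldl pvBSeg paths (pvSplitChar '{' cs) := by
  induction n with
  | zero =>
    intro cs hlen paths
    have hnil : cs = [] := List.eq_nil_of_length_eq_zero (by omega)
    subst hnil
    rw [pvSplitChar_of_not_mem _ _ (by simp), List.foldl_cons, List.foldl_nil]
    exact pvM2no [] (by simp) paths
  | succ n ih =>
    intro cs hlen paths
    by_cases hb : '{' ∈ cs
    · obtain ⟨s0, rest, rfl, hs0⟩ := pv_first_split '{' cs hb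
      have hrest : rest.length ≤ n := by simp at hlen; omega
      rw [pvSplitChar_append _ _ _ hs0, List.foldl_cons]
      by_cases hf : PySem.Chars.find s0 ['}'] = -1
      · have hcl : '}' ∉ s0 := by
          rw [PySem.Chars.find_eq_neg_one_iff] at hf
          exact fun hm => hf ((pv_singleton_infix _ _).mpr hm)
        rw [List.foldl_append, pvK2run s0 _ _ hs0 hcl, List.foldl_cons, pvAStep_brace,
          ih rest hrest, pvBSeg_no_close _ _ hcl]
        simp
      · obtain ⟨k, hk, hdec, hpre⟩ := pv_find_decomp s0 hf
        have hpre1 : '{' ∉ s0.take k := fun hm => hs0 (List.mem_of_mem_take hm)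
        have hsuf1 : '{' ∉ s0.drop (k + 1) := fun hm => hs0 (List.mem_of_mem_drop hm)
        conv_lhs => rw [hdec]
        have hass : (s0.take k ++ '}' :: s0.drop (k + 1)) ++ '{' :: rest
            = s0.take k ++ '}' :: (s0.drop (k + 1) ++ '{' :: rest) := by simp
        rw [hass, List.foldl_append, pvK2run _ _ _ hpre1 hpre, List.foldl_cons,
          List.nil_append, pvAStep_close, pvK1b _ _ _ _ hsuf1 (by simp),
          ih rest hrest, pvBSeg_close _ _ k hk]
        rfl
    · rw [pvSplitChar_of_not_mem _ _ hb, List.foldl_cons, List.foldl_nil]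
      exact pvM2no cs hb paths

-- top level: A from the start state = B's whole computation
theorem pvM1 (cs : List Char) (paths : List String) :
    pvFinalize (List.foldl pvAStep (paths, [], false) cs)
      = match pvSplitChar '{' cs with
        | [] => paths
        | s0 :: rest => List.foldl pvBSeg (paths ++ (PySem.Chars.split₀ s0).map String.ofList) rest := by
  by_cases hb : '{' ∈ cs
  · obtain ⟨s0, rest, rfl, hs0⟩ := pv_first_split '{' cs hb
    rw [pvSplitChar_append _ _ _ hs0]
    rw [pvK1b _ _ _ _ hs0 (by simp), pvM2 rest.length rest le_rfl]
    rfl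
  · rw [pvSplitChar_of_not_mem _ _ hb]
    rw [pvK1a _ _ _ hb (by simp)]
    rfl

-- ===== VERDICT (by name: the statement is the Claim_ definition above) =====
theorem parse_dropped_files_py_spec : Claim_equal_parse_dropped_files_py := by
  intro raw _
  unfold Spec_parse_dropped_files_py
  show parse_dropped_files_py raw = parse_dropped_files_py_alt raw
  simp only [parse_dropped_files_py, parse_dropped_files_py_alt]
  rw [splitOn_eq_pvSplitChar]
  by_cases h0 : PySem.Chars.strip raw.toList = []
  · rw [if_pos h0, h0]
    simp [pvSplitChar, PySem.Chars.split₀, PySem.Chars.split₀.go]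
  · rw [if_neg h0]
    have hA := pvM1 (PySem.Chars.strip raw.toList) ([] : List String)
    simp only [pvFinalize, pvFlush, List.nil_append] at hA
    rw [hA]
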